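-- pv_equiv track=rewrite | github.com/21betmaster-byte/ai-candidate-evaluator | backend/app/pipeline/github.py | _parse_go_mod
-- ===== SOURCE A (Python) =====
-- def _parse_go_mod(text: str) -> list[str]:
--     deps: list[str] = []
--     in_block = False
--     for raw in text.splitlines():
--         line = raw.strip()
--         if not line or line.startswith("//"):
--             continue
--         if line.startswith("require ("):
--             in_block = True
--             continue
--         if in_block:
--             if line == ")":
--                 in_block = False
--                 continue
--             parts = line.split()
--             if parts:
--                 deps.append(parts[0])
--             continue
--         if line.startswith("require "):
--             parts = line[len("require "):].split()
--             if parts: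
--                 deps.append(parts[0])
--     return deps
-- ===== SOURCE B (Python) =====
-- def _parse_go_mod(text: str) -> list[str]:
--     deps: list[str] = []
--     lines = iter(text.splitlines())
--     for raw in lines:
--         line = raw.strip()
--         if not line or line.startswith("//"):
--             continue
--         if line.startswith("require ("):
--             # consume the block's lines from the same iterator
--             for raw2 in lines:
--                 inner = raw2.strip()
--                 if not inner or inner.startswith("//"):
--                     continue
--                 if inner == ")":
--                     break
--                 if inner.startswith("require ("):
--                     continue
--                 parts = inner.split()
--                 if parts:
--                     deps.append(parts[0])
--         elif line.startswith("require "):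
--             parts = line[len("require "):].split()
--             if parts:
--                 deps.append(parts[0])
--     return deps
-- ===== Notes on version B (the rewrite author's own statement) =====
-- stated objective: alternative
-- what changed: The boolean in_block flag and its per-line state checks are replaced by control flow: the outer loop pulls lines from an explicit iterator and, on a block-opening require line, a nested inner loop consumes the block's lines from the same iterator until the closing-parenthesis line (or EOF), so the parser's mode lives in the program counter instead of a flag.
import Mathlib
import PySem

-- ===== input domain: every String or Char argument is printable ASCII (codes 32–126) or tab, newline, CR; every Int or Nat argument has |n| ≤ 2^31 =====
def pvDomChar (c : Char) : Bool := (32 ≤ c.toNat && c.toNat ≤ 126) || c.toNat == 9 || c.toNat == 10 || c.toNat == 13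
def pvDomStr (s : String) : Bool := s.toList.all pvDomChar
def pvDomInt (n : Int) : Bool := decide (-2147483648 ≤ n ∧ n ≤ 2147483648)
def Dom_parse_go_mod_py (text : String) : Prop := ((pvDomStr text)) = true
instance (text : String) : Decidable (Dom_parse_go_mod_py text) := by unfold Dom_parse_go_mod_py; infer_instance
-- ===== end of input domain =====

-- B replaces A's in_block flag by a nested inner loop over the same line iterator (same O(n) cost, different decomposition).

-- ===== PORT A =====
-- A's single for-loop with state (deps, in_block), as structural recursion over the split lines.
def parseGoModA (lines : List String) (deps : List String) (inBlock : Bool) : List String :=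
  match lines with
  | [] => deps
  | raw :: rest =>
    let line := PySem.Str.strip raw
    if line = "" ∨ PySem.Str.startswith line "//" = true then
      parseGoModA rest deps inBlock
    else if PySem.Str.startswith line "require (" = true then
      parseGoModA rest deps true
    else if inBlock = true then
      if line = ")" then parseGoModA rest deps false
      else
        match PySem.Str.split₀ line with
        | p :: _ => parseGoModA rest (deps ++ [p]) true
        | [] => parseGoModA rest deps true
    else if PySem.Str.startswith line "require " = true then
      match PySem.Str.split₀ (PySem.Str.slice line (some 8) none) with
      | p :: _ => parseGoModA rest (deps ++ [p]) inBlock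
      | [] => parseGoModA rest deps inBlock
    else parseGoModA rest deps inBlock

def parse_go_mod_py (text : String) : List String :=
  parseGoModA (PySem.Str.splitlines text) [] false

-- ===== PORT B =====
-- B's outer loop / nested block loop, as a mutual pair of recursions over the remaining lines.
mutual
  def parseGoModOuter (lines : List String) (deps : List String) : List String :=
    match lines with
    | [] => deps
    | raw :: rest =>
      let line := PySem.Str.strip raw
      if line = "" ∨ PySem.Str.startswith line "//" = true then
        parseGoModOuter rest deps
      else if PySem.Str.startswith line "require (" = true then
        parseGoModInner rest deps
      else if PySem.Str.startswith line "require " = true then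
        match PySem.Str.split₀ (PySem.Str.slice line (some 8) none) with
        | p :: _ => parseGoModOuter rest (deps ++ [p])
        | [] => parseGoModOuter rest deps
      else parseGoModOuter rest deps

  def parseGoModInner (lines : List String) (deps : List String) : List String :=
    match lines with
    | [] => deps
    | raw :: rest =>
      let inner := PySem.Str.strip raw
      if inner = "" ∨ PySem.Str.startswith inner "//" = true then
        parseGoModInner rest deps
      else if inner = ")" then
        parseGoModOuter rest deps
      else if PySem.Str.startswith inner "require (" = true then
        parseGoModInner rest deps
      else
        match PySem.Str.split₀ inner with
        | p :: _ => parseGoModInner rest (deps ++ [p])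
        | [] => parseGoModInner rest deps
end

def parse_go_mod_py_alt (text : String) : List String :=
  parseGoModOuter (PySem.Str.splitlines text) []

-- ===== PRECONDITION & SPEC =====
def Spec_parse_go_mod_py (text : String) (out : List String) : Prop := out = parse_go_mod_py_alt text
instance (text : String) (out : List String) : Decidable (Spec_parse_go_mod_py text out) := by unfold Spec_parse_go_mod_py; infer_instance

-- ===== CLAIM (what is proved, stated in full; the proofs are below) =====
def Claim_equal_parse_go_mod_py : Prop := ∀ (text : String), Dom_parse_go_mod_py text → Spec_parse_go_mod_py text (parse_go_mod_py text)

-- ===== LEMMAS AND PROOFS =====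
theorem parseGoMod_outer_inner_eq (lines : List String) :
    ∀ deps, parseGoModOuter lines deps = parseGoModA lines deps false ∧
            parseGoModInner lines deps = parseGoModA lines deps true := by
  induction lines with
  | nil => intro deps; exact ⟨rfl, rfl⟩
  | cons raw rest ih =>
    intro deps
    constructor
    · rw [parseGoModOuter, parseGoModA]
      by_cases h1 : PySem.Str.strip raw = "" ∨ PySem.Str.startswith (PySem.Str.strip raw) "//" = true
      · simp only [h1, if_true]; exact (ih deps).1
      · simp only [h1, if_false]
        by_cases h2 : PySem.Str.startswith (PySem.Str.strip raw) "require (" = true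
        · simp only [h2, if_true]; exact (ih deps).2
        · simp only [h2, if_false, Bool.false_eq_true, if_false]
          by_cases h3 : PySem.Str.startswith (PySem.Str.strip raw) "require " = true
          · simp only [h3, if_true]
            cases PySem.Str.split₀ (PySem.Str.slice (PySem.Str.strip raw) (some 8) none) with
            | nil => exact (ih deps).1
            | cons p _ => exact (ih (deps ++ [p])).1
          · simp only [h3]; exact (ih deps).1
    · rw [parseGoModInner, parseGoModA]
      by_cases h1 : PySem.Str.strip raw = "" ∨ PySem.Str.startswith (PySem.Str.strip raw) "//" = true
      · simp only [h1, if_true]; exact (ih deps).2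
      · simp only [h1, if_false]
        by_cases h2 : PySem.Str.startswith (PySem.Str.strip raw) "require (" = true
        · have hne : ¬ PySem.Str.strip raw = ")" := by
            intro h; rw [h] at h2; exact absurd h2 (by decide)
          simp only [h2, if_true, hne, if_false]
          exact (ih deps).2
        · simp only [h2, if_false, Bool.false_eq_true, if_false, if_true]
          by_cases h3 : PySem.Str.strip raw = ")"
          · simp only [h3, if_true]; exact (ih deps).1
          · simp only [h3, if_false]
            cases PySem.Str.split₀ (PySem.Str.strip raw) with
            | nil => exact (ih deps).2
            | cons p _ => exact (ih (deps ++ [p])).2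

-- ===== VERDICT (by name: the statement is the Claim_ definition above) =====
theorem parse_go_mod_py_spec : Claim_equal_parse_go_mod_py := by
  intro text _
  unfold Spec_parse_go_mod_py parse_go_mod_py parse_go_mod_py_alt
  exact (parseGoMod_outer_inner_eq (PySem.Str.splitlines text) []).1.symm
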